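-- pv_equiv track=rewrite | github.com/ghdwpaks/DC | dev_util/32_cry_main.py | FillUp0
-- ===== SOURCE A (Python) =====
-- def FillUp0(i,byte=4) :
--     #i = 10
--     i = list(i)
--     while True :
--         if len(i) < byte :
--             i.insert(0,"0")
--         else :
--             break
--     return "".join(i)
-- ===== SOURCE B (Python) =====
-- def FillUp0(i, byte=4):
--     s = "".join(list(i))
--     return "0" * (byte - len(s)) + s
-- ===== Notes on version B (the rewrite author's own statement) =====
-- stated objective: faster
-- what changed: Replaces the one-zero-at-a-time front-insert loop with a single closed-form padding: compute byte - len(s) and prepend that many zeros at once (Python's '0'*n is empty for n<=0, matching the loop's immediate break).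
import Mathlib
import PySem

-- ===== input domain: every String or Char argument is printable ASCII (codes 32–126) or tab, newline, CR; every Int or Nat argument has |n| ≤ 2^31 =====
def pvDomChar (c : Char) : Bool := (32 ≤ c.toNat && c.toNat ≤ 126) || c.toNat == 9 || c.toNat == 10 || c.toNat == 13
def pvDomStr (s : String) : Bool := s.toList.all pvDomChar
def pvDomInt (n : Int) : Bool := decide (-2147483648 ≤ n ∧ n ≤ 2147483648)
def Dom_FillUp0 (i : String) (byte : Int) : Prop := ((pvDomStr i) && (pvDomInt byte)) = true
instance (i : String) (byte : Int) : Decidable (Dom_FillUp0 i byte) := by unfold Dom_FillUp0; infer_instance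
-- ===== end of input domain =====

-- B replaces A's one-zero-at-a-time front-insert loop by a closed-form "prepend (byte - len) zeros at once"; asymptotically faster on large padding.


-- ===== PORT A =====
-- the 'while True' loop: insert "0" at position 0 while len < byte, else break
def fillUp0Loop (l : List Char) (byte : Int) : List Char :=
  if (l.length : Int) < byte then fillUp0Loop ('0' :: l) byte else l
termination_by (byte - l.length).toNat
decreasing_by simp; omega

def FillUp0 (i : String) (byte : Int) : String :=
  String.ofList (fillUp0Loop i.toList byte)

-- ===== PORT B =====
-- s = "".join(list(i)); return "0" * (byte - len(s)) + s
def FillUp0_alt (i : String) (byte : Int) : String :=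
  String.ofList (List.replicate (byte - i.toList.length).toNat '0' ++ i.toList)

-- ===== PRECONDITION & SPEC =====
def Spec_FillUp0 (i : String) (byte : Int) (out : String) : Prop := out = FillUp0_alt i byte
instance (i : String) (byte : Int) (out : String) : Decidable (Spec_FillUp0 i byte out) := by unfold Spec_FillUp0; infer_instance

-- ===== CLAIM (what is proved, stated in full; the proofs are below) =====
def Claim_equal_FillUp0 : Prop := ∀ (i : String) (byte : Int), Dom_FillUp0 i byte → Spec_FillUp0 i byte (FillUp0 i byte)

-- ===== LEMMAS AND PROOFS =====
theorem fillUp0Loop_eq (byte : Int) (l : List Char) :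
    fillUp0Loop l byte = List.replicate (byte - l.length).toNat '0' ++ l := by
  generalize hn : (byte - l.length).toNat = n
  induction n generalizing l with
  | zero =>
    rw [fillUp0Loop]
    have : ¬ ((l.length : Int) < byte) := by omega
    simp [this]
  | succ n ih =>
    rw [fillUp0Loop]
    have hlt : (l.length : Int) < byte := by omega
    have h' : (byte - ('0' :: l).length).toNat = n := by simp; omega
    simp only [hlt, if_true, ih _ h']
    rw [List.replicate_succ']
    simp

-- ===== VERDICT (by name: the statement is the Claim_ definition above) =====
theorem FillUp0_spec : Claim_equal_FillUp0 := by
  intro i byte _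
  unfold Spec_FillUp0 FillUp0 FillUp0_alt
  rw [fillUp0Loop_eq]
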